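-- pv_equiv track=rewrite | github.com/Mellanox/SAI-P4-BM | p4-softswitch/targets/P4-SAI/logs/scripts/animate_flow.py | fix_lines
-- ===== SOURCE A (Python) =====
-- def new_line(end=False,x=0,style='st500'):
-- 	if (end): return'</tspan>'
-- 	else:	return '<tspan x="'+str(x) +'" dy="1.2em" class = "' + style+ '">'
--
-- def fix_lines(text,line_len = 12,style ='st500',x=0):
-- 	words = text.split(' ')
-- 	if len(words)>1 and len(text)>line_len:
-- 		text_out = words[0]
-- 		n=len(text_out) ; i=1 ;  close_last_line = "" ; space =True
-- 		while i<len(words):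
-- 			if n+len(words[i]) >line_len:
-- 				text_out += close_last_line + new_line(x=x,style=style)
-- 				close_last_line = new_line(end=True)
-- 				n=0; space= False
-- 			text_out += (' ' if space else '')+ words[i]
-- 			n+=len(words[i]) ; space = True ; i+=1
-- 		return text_out +close_last_line
-- 	else: return text
-- ===== SOURCE B (Python) =====
-- def new_line(end=False, x=0, style='st500'):
--     if end:
--         return '</tspan>'
--     return '<tspan x="' + str(x) + '" dy="1.2em" class = "' + style + '">'
--
-- def fix_lines(text, line_len=12, style='st500', x=0):
--     words = text.split(' ')
--     if len(words) > 1 and len(text) > line_len: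
--         # pass 1: greedily group words into lines (counting word chars only, strict '>')
--         lines = []
--         cur = [words[0]]
--         n = len(words[0])
--         for w in words[1:]:
--             if n + len(w) > line_len:
--                 lines.append(cur)
--                 cur = [w]
--                 n = len(w)
--             else:
--                 cur.append(w)
--                 n += len(w)
--         lines.append(cur)
--         # pass 2: render; continuation lines are wrapped in open/close tspan tags
--         out = ' '.join(lines[0])
--         for line in lines[1:]:
--             out += new_line(x=x, style=style) + ' '.join(line) + new_line(end=True)
--         return out
--     return text
-- ===== Notes on version B (the rewrite author's own statement) =====
-- stated objective: alternative
-- what changed: A interleaves grouping and rendering in one stateful while-loop (pending close tag, space flag, running count); B separates them into two passes: first greedily group the words into a list of lines, then render line 0 plain and each continuation line wrapped in open/close tspan tags.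
import Mathlib
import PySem

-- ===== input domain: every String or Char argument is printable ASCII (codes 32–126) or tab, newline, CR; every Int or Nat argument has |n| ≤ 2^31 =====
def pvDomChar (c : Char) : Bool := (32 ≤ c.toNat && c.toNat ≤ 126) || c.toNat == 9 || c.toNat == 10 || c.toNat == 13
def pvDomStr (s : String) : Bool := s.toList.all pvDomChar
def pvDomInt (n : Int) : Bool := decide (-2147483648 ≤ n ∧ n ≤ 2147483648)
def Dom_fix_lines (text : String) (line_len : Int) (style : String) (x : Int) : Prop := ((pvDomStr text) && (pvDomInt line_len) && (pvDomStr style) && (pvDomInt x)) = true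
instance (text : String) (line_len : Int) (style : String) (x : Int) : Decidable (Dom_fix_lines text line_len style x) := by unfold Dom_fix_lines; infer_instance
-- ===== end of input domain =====

-- B re-decomposes A's single mutating loop into two passes (group words into lines, then render); same return value, similar cost.

-- ===== PORT A =====
-- new_line(end, x, style) from the Python module
def new_line (end_ : Bool) (x : Int) (style : String) : String :=
  if end_ then "</tspan>"
  else "<tspan x=\"" ++ PySem.Int.toStr x ++ "\" dy=\"1.2em\" class = \"" ++ style ++ "\">"

-- A's while-loop: state (text_out, n, close_last_line, space), one word per step
def fixLoopA (line_len : Int) (style : String) (x : Int) :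
    List String → String → Int → String → Bool → String
  | [], text_out, _, close_last_line, _ => text_out ++ close_last_line
  | w :: ws, text_out, n, close_last_line, space =>
    if n + PySem.Str.len w > line_len then
      -- break branch: n = 0, space = False (so '' is prepended to w), then n += len w, space = True
      fixLoopA line_len style x ws
        (text_out ++ close_last_line ++ new_line false x style ++ "" ++ w)
        (0 + PySem.Str.len w) (new_line true x style) true
    else
      fixLoopA line_len style x ws
        (text_out ++ (if space then " " else "") ++ w)
        (n + PySem.Str.len w) close_last_line true

def fix_lines (text : String) (line_len : Int) (style : String) (x : Int) : String :=
  match (PySem.Str.split? text " ").getD [] with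
  | w0 :: w1 :: ws =>        -- len(words) > 1
    if PySem.Str.len text > line_len then
      fixLoopA line_len style x (w1 :: ws) w0 (PySem.Str.len w0) "" true
    else text
  | _ => text

-- ===== PORT B =====
-- pass 1: greedily group the words into lines (word characters only, strict '>')
def fixGroupB (line_len : Int) :
    List String → List (List String) → List String → Int → List (List String)
  | [], lines, cur, _ => lines ++ [cur]
  | w :: ws, lines, cur, n =>
    if n + PySem.Str.len w > line_len then
      fixGroupB line_len ws (lines ++ [cur]) [w] (PySem.Str.len w)
    else
      fixGroupB line_len ws lines (cur ++ [w]) (n + PySem.Str.len w)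

-- pass 2: line 0 joined plain, every further line wrapped in open/close tags
def fixRenderB (style : String) (x : Int) : List (List String) → String
  | [] => ""
  | l0 :: rest =>
    rest.foldl
      (fun out l => out ++ new_line false x style ++ PySem.Str.join " " l ++ new_line true x style)
      (PySem.Str.join " " l0)

def fix_lines_alt (text : String) (line_len : Int) (style : String) (x : Int) : String :=
  match (PySem.Str.split? text " ").getD [] with
  | [] => text
  | [_] => text
  | w0 :: rest =>
    if PySem.Str.len text > line_len then
      fixRenderB style x (fixGroupB line_len rest [] [w0] (PySem.Str.len w0))
    else text

-- ===== PRECONDITION & SPEC =====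
def Spec_fix_lines (text : String) (line_len : Int) (style : String) (x : Int) (out : String) : Prop := out = fix_lines_alt text line_len style x
instance (text : String) (line_len : Int) (style : String) (x : Int) (out : String) : Decidable (Spec_fix_lines text line_len style x out) := by unfold Spec_fix_lines; infer_instance

-- ===== CLAIM (what is proved, stated in full; the proofs are below) =====
def Claim_equal_fix_lines : Prop := ∀ (text : String) (line_len : Int) (style : String) (x : Int), Dom_fix_lines text line_len style x → Spec_fix_lines text line_len style x (fix_lines text line_len style x)

-- ===== LEMMAS AND PROOFS =====

theorem joinSp_singleton (w : String) : PySem.Str.join " " [w] = w := by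
  rw [← String.toList_inj]; simp [PySem.Str.toList_join, PySem.Chars.join_singleton]

theorem joinSp_cons_cons (c w : String) (t : List String) :
    PySem.Str.join " " (c :: w :: t) = c ++ " " ++ PySem.Str.join " " (w :: t) := by
  rw [← String.toList_inj]; simp [PySem.Str.toList_join, PySem.Chars.join_cons_cons]

theorem joinSp_append_singleton (p : List String) (w : String) (hp : p ≠ []) :
    PySem.Str.join " " (p ++ [w]) = PySem.Str.join " " p ++ " " ++ w := by
  induction p with
  | nil => exact absurd rfl hp
  | cons c t ih =>
    cases t with
    | nil => simp [joinSp_cons_cons, joinSp_singleton]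
    | cons d t' =>
      simp only [List.cons_append]
      rw [joinSp_cons_cons c d (t' ++ [w]), joinSp_cons_cons c d t']
      have := ih (by simp)
      simp only [List.cons_append] at this
      rw [this]; simp [String.append_assoc]

-- the rendered prefix A has accumulated when the remaining words are grouped from state (lines, cur)
def prefA (style : String) (x : Int) : List (List String) → List String → String
  | [], cur => PySem.Str.join " " cur
  | h :: t, cur => fixRenderB style x (h :: t) ++ new_line false x style ++ PySem.Str.join " " cur

-- A's pending close tag: empty while still on the first line
def pcloseA : List (List String) → String
  | [] => ""
  | _ :: _ => "</tspan>"

theorem renderB_append_singleton (style : String) (x : Int) (lines : List (List String)) (cur : List String) :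
    fixRenderB style x (lines ++ [cur]) = prefA style x lines cur ++ pcloseA lines := by
  cases lines with
  | nil => simp [fixRenderB, prefA, pcloseA]
  | cons h t =>
    simp only [fixRenderB, prefA, pcloseA, List.cons_append, List.foldl_append, List.foldl_cons,
      List.foldl_nil, new_line, if_pos, String.append_assoc]

theorem prefA_nonempty (style : String) (x : Int) (lines : List (List String)) (cur : List String)
    (h : lines ≠ []) :
    prefA style x lines cur
      = fixRenderB style x lines ++ new_line false x style ++ PySem.Str.join " " cur := by
  cases lines with
  | nil => exact absurd rfl h
  | cons a t => rfl

theorem fixLoopA_eq_renderB (line_len : Int) (style : String) (x : Int) :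
    ∀ (ws : List String) (lines : List (List String)) (cur : List String) (n : Int),
      cur ≠ [] →
      fixLoopA line_len style x ws (prefA style x lines cur) n (pcloseA lines) true =
        fixRenderB style x (fixGroupB line_len ws lines cur n) := by
  intro ws
  induction ws with
  | nil =>
    intro lines cur n _
    rw [fixLoopA, fixGroupB, renderB_append_singleton]
  | cons w ws ih =>
    intro lines cur n hcur
    rw [fixLoopA, fixGroupB]
    by_cases h : n + PySem.Str.len w > line_len
    · rw [if_pos h, if_pos h]
      have h1 : prefA style x lines cur ++ pcloseA lines ++ new_line false x style ++ "" ++ w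
          = prefA style x (lines ++ [cur]) [w] := by
        rw [prefA_nonempty style x (lines ++ [cur]) [w] (by simp),
          renderB_append_singleton, joinSp_singleton]
        simp [String.append_assoc]
      rw [h1, zero_add]
      have h2 : new_line true x style = pcloseA (lines ++ [cur]) := by
        cases lines <;> rfl
      rw [h2, ih (lines ++ [cur]) [w] (PySem.Str.len w) (by simp)]
    · rw [if_neg h, if_neg h]
      simp only [reduceIte]
      have h1 : prefA style x lines cur ++ " " ++ w = prefA style x lines (cur ++ [w]) := by
        cases lines with
        | nil => simp [prefA, joinSp_append_singleton cur w hcur]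
        | cons a t =>
          simp [prefA, joinSp_append_singleton cur w hcur, String.append_assoc]
      rw [h1, ih lines (cur ++ [w]) (n + PySem.Str.len w) (by simp)]

-- ===== VERDICT (by name: the statement is the Claim_ definition above) =====
theorem fix_lines_spec : Claim_equal_fix_lines := by
  intro text line_len style x _
  unfold Spec_fix_lines fix_lines fix_lines_alt
  cases hw : (PySem.Str.split? text " ").getD [] with
  | nil => rfl
  | cons w0 t =>
    cases t with
    | nil => rfl
    | cons w1 ws =>
      simp only []
      by_cases h : PySem.Str.len text > line_len
      · rw [if_pos h, if_pos h]
        have := fixLoopA_eq_renderB line_len style x (w1 :: ws) [] [w0] (PySem.Str.len w0) (by simp)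
        rwa [prefA, pcloseA, joinSp_singleton] at this
      · rw [if_neg h, if_neg h]
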